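-- pv_equiv track=rewrite | github.com/drasbaek/SafeTuber | src/mp4-to-text.py | concatenate_chunks
-- ===== SOURCE A (Python) =====
-- def concatenate_chunks(text_chunks):
--     joined_chunks = []
--     current_string = ""
--
--     for i, string in enumerate(text_chunks):
--
--         # Join current string with next string if current string is too short
--         if len(current_string.split()) < 10:
--             current_string += " " + string
--
--         # Add current string to joined data if it's long enough
--         else:
--             joined_chunks.append(current_string.strip())
--             current_string = string
--
--         # Add the last string to the joined data
--         if i == len(text_chunks) - 1:
--             joined_chunks.append(current_string.strip())
--
--     return joined_chunks
-- ===== SOURCE B (Python) =====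
-- def concatenate_chunks(text_chunks):
--     if not text_chunks:
--         return []
--     groups = []
--     group = [text_chunks[0]]
--     count = len(text_chunks[0].split())
--     for s in text_chunks[1:]:
--         if count < 10:
--             group.append(s)
--             count += len(s.split())
--         else:
--             groups.append(group)
--             group = [s]
--             count = len(s.split())
--     groups.append(group)
--     return [" ".join(g).strip() for g in groups]
-- ===== Notes on version B (the rewrite author's own statement) =====
-- stated objective: faster
-- what changed: B guards empty input, builds groups as lists of chunks with an incrementally maintained word count (each chunk split once) and renders all groups with a single join/strip map at the end, instead of A's per-iteration re-split of the growing accumulated string and the in-loop last-index append.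
import Mathlib
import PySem

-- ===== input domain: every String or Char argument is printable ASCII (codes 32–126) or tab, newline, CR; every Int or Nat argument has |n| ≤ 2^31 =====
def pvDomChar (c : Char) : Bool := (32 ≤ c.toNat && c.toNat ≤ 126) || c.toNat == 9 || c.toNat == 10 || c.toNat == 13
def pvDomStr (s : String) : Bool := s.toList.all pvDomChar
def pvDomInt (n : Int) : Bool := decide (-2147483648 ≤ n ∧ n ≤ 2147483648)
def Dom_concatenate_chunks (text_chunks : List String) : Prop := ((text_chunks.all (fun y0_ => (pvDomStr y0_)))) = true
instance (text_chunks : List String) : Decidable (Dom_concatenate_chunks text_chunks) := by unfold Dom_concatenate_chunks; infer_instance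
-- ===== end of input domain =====

-- B groups chunks as lists with an incrementally maintained word count and renders
-- every group once at the end, instead of A's re-split of the growing string and
-- in-loop last-index append.  Equivalence is proved for all inputs (A is total).

-- ===== PORT A =====
def concatenate_chunks (text_chunks : List String) : List String :=
  (List.foldl
    (fun (st : List String × String) (iv : Int × String) =>
      let st' :=
        if (PySem.Str.split₀ st.2).length < 10 then
          (st.1, st.2 ++ " " ++ iv.2)
        else
          (st.1 ++ [PySem.Str.strip st.2], iv.2)
      if iv.1 == (text_chunks.length : Int) - 1 then
        (st'.1 ++ [PySem.Str.strip st'.2], st'.2)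
      else st')
    ([], "") (PySem.List.enumerate text_chunks)).1

-- ===== PORT B =====
def concatenate_chunks_alt (text_chunks : List String) : List String :=
  match text_chunks with
  | [] => []
  | c :: rest =>
    let st := List.foldl
      (fun (st : List (List String) × List String × Int) (s : String) =>
        if st.2.2 < 10 then
          (st.1, st.2.1 ++ [s], st.2.2 + ((PySem.Str.split₀ s).length : Int))
        else
          (st.1 ++ [st.2.1], [s], ((PySem.Str.split₀ s).length : Int)))
      ([], [c], ((PySem.Str.split₀ c).length : Int)) rest
    (st.1 ++ [st.2.1]).map (fun g => PySem.Str.strip (PySem.Str.join " " g))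

-- ===== PRECONDITION & SPEC =====
def Spec_concatenate_chunks (text_chunks : List String) (out : List String) : Prop := out = concatenate_chunks_alt text_chunks
instance (text_chunks : List String) (out : List String) : Decidable (Spec_concatenate_chunks text_chunks out) := by unfold Spec_concatenate_chunks; infer_instance

-- ===== CLAIM (what is proved, stated in full; the proofs are below) =====
def Claim_equal_concatenate_chunks : Prop := ∀ (text_chunks : List String), Dom_concatenate_chunks text_chunks → Spec_concatenate_chunks text_chunks (concatenate_chunks text_chunks)

-- ===== LEMMAS AND PROOFS =====

-- A's loop body without the last-index append
def bstep (st : List String × String) (s : String) : List String × String :=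
  if (PySem.Str.split₀ st.2).length < 10 then
    (st.1, st.2 ++ " " ++ s)
  else
    (st.1 ++ [PySem.Str.strip st.2], s)

-- B's loop body
def cstep (st : List (List String) × List String × Int) (s : String) : List (List String) × List String × Int :=
  if st.2.2 < 10 then
    (st.1, st.2.1 ++ [s], st.2.2 + ((PySem.Str.split₀ s).length : Int))
  else
    (st.1 ++ [st.2.1], [s], ((PySem.Str.split₀ s).length : Int))

def render (g : List String) : String := PySem.Str.strip (PySem.Str.join " " g)

-- join with a single space, as a plain recursion
def jn : List String → List Char
  | [] => []
  | [g] => g.toList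
  | g :: g' :: gs => g.toList ++ ' ' :: jn (g' :: gs)

lemma jn_eq_join : ∀ g : List String, jn g = PySem.Chars.join [' '] (g.map String.toList) := by
  intro g
  induction g with
  | nil => simp [jn, PySem.Chars.join_nil]
  | cons x gs ih =>
    cases gs with
    | nil => simp [jn, PySem.Chars.join_singleton]
    | cons y gs' =>
      simp only [jn, List.map_cons, PySem.Chars.join_cons_cons]
      rw [ih]
      simp [List.append_assoc]

lemma jn_append (g : List String) (hg : g ≠ []) (s : String) :
    jn (g ++ [s]) = jn g ++ ' ' :: s.toList := by
  induction g with
  | nil => exact absurd rfl hg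
  | cons x gs ih =>
    cases gs with
    | nil => simp [jn]
    | cons y gs' =>
      have h1 : (x :: y :: gs') ++ [s] = x :: ((y :: gs') ++ [s]) := rfl
      rw [h1]
      have h2 : (y :: gs') ++ [s] = y :: (gs' ++ [s]) := rfl
      have h3 : jn (x :: ((y :: gs') ++ [s])) = x.toList ++ ' ' :: jn ((y :: gs') ++ [s]) := by
        rw [h2]; cases gs' <;> rfl
      rw [h3, ih (by simp)]
      simp [jn]

lemma go_acc (s : List Char) : ∀ (cur : List Char) (acc : List (List Char)),
    PySem.Chars.split₀.go s cur acc = acc.reverse ++ PySem.Chars.split₀.go s cur [] := by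
  induction s with
  | nil => intro cur acc; simp only [PySem.Chars.split₀.go]; split_ifs <;> simp
  | cons c rest ih =>
    intro cur acc
    by_cases hc : PySem.Chars.isspace c = true
    · by_cases hcur : cur.isEmpty
      · simp only [PySem.Chars.split₀.go, hc, hcur, if_true]
        exact ih [] acc
      · simp only [PySem.Chars.split₀.go, hc, hcur, if_true, Bool.false_eq_true, if_false]
        rw [ih [] (cur.reverse :: acc), ih [] [cur.reverse]]
        simp
    · simp only [PySem.Chars.split₀.go, hc, Bool.false_eq_true, if_false]
      exact ih (c :: cur) acc

lemma go_space (b : List Char) : ∀ (a cur : List Char) (acc : List (List Char)),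
    PySem.Chars.split₀.go (a ++ ' ' :: b) cur acc
      = PySem.Chars.split₀.go a cur acc ++ PySem.Chars.split₀.go b [] [] := by
  intro a
  induction a with
  | nil =>
    intro cur acc
    have hsp : PySem.Chars.isspace ' ' = true := by decide
    simp only [List.nil_append, PySem.Chars.split₀.go, hsp, if_true]
    split_ifs with hcur
    · rw [go_acc b [] acc]
      try simp
    · rw [go_acc b [] (cur.reverse :: acc)]
      try simp
  | cons c a ih =>
    intro cur acc
    by_cases hc : PySem.Chars.isspace c = true
    · by_cases hcur : cur.isEmpty
      · simp only [List.cons_append, PySem.Chars.split₀.go, hc, hcur, if_true]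
        exact ih [] acc
      · simp only [List.cons_append, PySem.Chars.split₀.go, hc, hcur, if_true, Bool.false_eq_true, if_false]
        exact ih [] (cur.reverse :: acc)
    · simp only [List.cons_append, PySem.Chars.split₀.go, hc, Bool.false_eq_true, if_false]
      exact ih (c :: cur) acc

lemma split₀_space (a b : List Char) :
    PySem.Chars.split₀ (a ++ ' ' :: b) = PySem.Chars.split₀ a ++ PySem.Chars.split₀ b := by
  simp only [PySem.Chars.split₀]
  exact go_space b a [] []

lemma strip_space (l : List Char) : PySem.Chars.strip (' ' :: l) = PySem.Chars.strip l := by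
  have hsp : PySem.Chars.isspace ' ' = true := by decide
  simp [PySem.Chars.strip, PySem.Chars.lstrip, hsp]

lemma len_split₀_toList (s : String) :
    (PySem.Str.split₀ s).length = (PySem.Chars.split₀ s.toList).length := by
  rw [← PySem.Str.split₀_map_toList, List.length_map]

lemma strip_render (current : String) (group : List String)
    (h : current.toList = jn group ∨ current.toList = ' ' :: jn group) :
    PySem.Str.strip current = render group := by
  have hj : (PySem.Str.join " " group).toList = jn group := by
    rw [jn_eq_join]
    simp [PySem.Str.join]
  show String.ofList (PySem.Chars.strip current.toList) = _
  have : render group = String.ofList (PySem.Chars.strip (jn group)) := by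
    simp [render, PySem.Str.strip, hj]
  rw [this]
  rcases h with h | h <;> rw [h]
  rw [strip_space]

-- the enumerate fold with a body ignoring the index is a plain fold
lemma foldl_enum_bstep (l : List String) : ∀ (k : Int) (st : List String × String),
    List.foldl (fun st (iv : Int × String) => bstep st iv.2) st (PySem.List.enumerate l k)
      = List.foldl bstep st l := by
  induction l with
  | nil => intro k st; simp [PySem.List.enumerate_nil]
  | cons x xs ih =>
    intro k st
    rw [PySem.List.enumerate_cons, List.foldl_cons, List.foldl_cons, ih]

-- A on a nonempty list is the bstep fold followed by one final append
lemma A_closed (l : List String) (h : l ≠ []) :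
    concatenate_chunks l
      = (List.foldl bstep ([], "") l).1 ++ [PySem.Str.strip (List.foldl bstep ([], "") l).2] := by
  rcases List.eq_nil_or_concat l with rfl | ⟨l', a, rfl⟩
  · exact absurd rfl h
  simp only [List.concat_eq_append]
  unfold concatenate_chunks
  rw [PySem.List.enumerate_append]
  simp only [PySem.List.enumerate_cons, PySem.List.enumerate_nil]
  rw [List.foldl_append]
  rw [PySem.List.foldl_congr_mem (PySem.List.enumerate l' 0) _ (fun st (iv : Int × String) => bstep st iv.2) _ ?_]
  swap
  · intro acc x hx
    rw [PySem.List.mem_enumerate_iff] at hx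
    obtain ⟨k, hk, rfl⟩ := hx
    have hne : ((0 + (k : Int)) == ((l' ++ [a]).length : Int) - 1) = false := by
      simp only [beq_eq_false_iff_ne, ne_eq, List.length_append, List.length_cons,
        List.length_nil]
      push_cast
      omega
    simp only [hne, Bool.false_eq_true, if_false]
    rfl
  rw [foldl_enum_bstep]
  simp only [List.foldl_cons, List.foldl_nil]
  have heq : ((0 + (l'.length : Int)) == ((l' ++ [a]).length : Int) - 1) = true := by
    simp only [beq_iff_eq, List.length_append, List.length_cons, List.length_nil]
    push_cast
    ring
  simp only [heq, if_true]
  rw [List.foldl_append, List.foldl_cons, List.foldl_nil]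
  simp only [bstep]

-- main invariant: the two folds agree under the state relation
lemma fold_inv : ∀ (rest : List String) (joined : List String) (current : String)
    (groups : List (List String)) (group : List String) (count : Int),
    group ≠ [] →
    (current.toList = jn group ∨ current.toList = ' ' :: jn group) →
    joined = groups.map render →
    count = ((PySem.Chars.split₀ current.toList).length : Int) →
    ((List.foldl bstep (joined, current) rest).1
        ++ [PySem.Str.strip (List.foldl bstep (joined, current) rest).2])
      = (((List.foldl cstep (groups, group, count) rest).1
          ++ [(List.foldl cstep (groups, group, count) rest).2.1]).map render) := by
  intro rest
  induction rest with
  | nil =>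
    intro joined current groups group count hg hcur hj hc
    simp only [List.foldl_nil, List.map_append, List.map_cons, List.map_nil]
    rw [hj, strip_render current group hcur]
  | cons s rest ih =>
    intro joined current groups group count hg hcur hj hc
    by_cases hlt : (PySem.Chars.split₀ current.toList).length < 10
    · have hA : bstep (joined, current) s = (joined, current ++ " " ++ s) := by
        simp [bstep, len_split₀_toList, hlt]
      have hB : cstep (groups, group, count) s
          = (groups, group ++ [s], count + ((PySem.Str.split₀ s).length : Int)) := by
        simp only [cstep, hc]
        rw [if_pos (by exact_mod_cast hlt)]
      rw [List.foldl_cons, List.foldl_cons, hA, hB]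
      have htl : (current ++ " " ++ s).toList = current.toList ++ ' ' :: s.toList := by
        simp
      apply ih
      · simp
      · rw [htl]
        rcases hcur with h | h <;> rw [h]
        · left; rw [jn_append group hg s]
        · right; rw [List.cons_append, jn_append group hg s]
      · exact hj
      · rw [htl, hc, split₀_space, List.length_append, len_split₀_toList]
        push_cast
        ring
    · have hA : bstep (joined, current) s = (joined ++ [PySem.Str.strip current], s) := by
        simp [bstep, len_split₀_toList, hlt]
      have hB : cstep (groups, group, count) s
          = (groups ++ [group], [s], ((PySem.Str.split₀ s).length : Int)) := by
        simp only [cstep, hc]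
        rw [if_neg (by exact_mod_cast hlt)]
      rw [List.foldl_cons, List.foldl_cons, hA, hB]
      apply ih
      · simp
      · left; rfl
      · rw [hj, List.map_append, List.map_cons, List.map_nil,
          strip_render current group hcur]
      · rw [len_split₀_toList]

-- ===== VERDICT (by name: the statement is the Claim_ definition above) =====
theorem concatenate_chunks_spec : Claim_equal_concatenate_chunks := by
  intro l _
  unfold Spec_concatenate_chunks
  cases l with
  | nil => rfl
  | cons c rest =>
    rw [A_closed (c :: rest) (by simp)]
    show _ = (((List.foldl cstep ([], [c], ((PySem.Str.split₀ c).length : Int)) rest).1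
        ++ [(List.foldl cstep ([], [c], ((PySem.Str.split₀ c).length : Int)) rest).2.1]).map render)
    have h0 : bstep ([], "") c = ([], "" ++ " " ++ c) := by
      simp [bstep, PySem.Str.split₀, PySem.Chars.split₀, PySem.Chars.split₀.go]
    rw [List.foldl_cons, h0]
    apply fold_inv
    · simp
    · right
      have : ("" ++ " " ++ c).toList = ' ' :: c.toList := by simp
      rw [this, jn]
    · rfl
    · have : ("" ++ " " ++ c).toList = [] ++ ' ' :: c.toList := by simp
      rw [this, split₀_space]
      have h2 : PySem.Chars.split₀ ([] : List Char) = [] := rfl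
      rw [h2, List.nil_append, len_split₀_toList]
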